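-- pv_equiv track=rewrite | github.com/Nyptop/POPI-Project | battleships.py | ok_to_place_ship_at
-- ===== SOURCE A (Python) =====
-- def is_open_sea(row, column, fleet):
--     """goes through all the ships in the fleet, seeing whether any of them already occupy the coordinates in question"""
--     for ship in fleet:
--         horizontal = ship[2]
--         if horizontal==True:
--             for j in range(ship[1],ship[1]+ship[3]): #scanning along ship (left to right) to ensure coordinates not already occupied
--                 if column==j and row == ship[0]:
--                     return False
--         else:
--             for i in range(ship[0],ship[0]+ship[3]): #scanning along ship (top to bottom) to ensure coordinates not already occupied
--                 if row==i and column == ship[1]: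
--                     return False
--     return True
--
-- def ok_to_place_ship_at(row, column, horizontal, length, fleet):
--     """scans a 2D grid around (and including) the coordinates of the proposed ship, only returning True if it is all open sea"""
--     if horizontal == True:
--         for i in range(row-1, row+2): #iterating over rows from 1 above coordinate to 1 below coordinate
--             for j in range(column-1,column+length+1): #iterating over columns from 1 left of coordinate to 1 right of coordinate
--                 if is_open_sea(i,j,fleet)==False:
--                     return False
--         #checking the ship is on the board
--         if (column+length-1)>9:
--             return False
--     else:
--         for i in range(row-1, row+length+1): #iterating over rows from 1 above coordinate to 1 below coordinate
--             for j in range(column-1, column+2): #iterating over columns from 1 left of coordinate to 1 right of coordinate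
--                 if is_open_sea(i,j,fleet)==False:
--                     return False
--         #checking the ship is on the board
--         if (row+length-1)>9:
--             return False
--     return True
-- ===== SOURCE B (Python) =====
-- def ok_to_place_ship_at(row, column, horizontal, length, fleet):
--     # One pass over the fleet: interval-intersection test of each ship's span
--     # against the exclusion rectangle, instead of scanning every region cell.
--     if horizontal:
--         rlo, rhi, clo, chi = row - 1, row + 1, column - 1, column + length
--     else:
--         rlo, rhi, clo, chi = row - 1, row + length, column - 1, column + 1
--     for r0, c0, h, l in fleet:
--         if h:
--             if rlo <= r0 <= rhi and max(c0, clo) <= min(c0 + l - 1, chi):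
--                 return False
--         else:
--             if clo <= c0 <= chi and max(r0, rlo) <= min(r0 + l - 1, rhi):
--                 return False
--     if horizontal:
--         return column + length - 1 <= 9
--     return row + length - 1 <= 9
-- ===== Notes on version B (the rewrite author's own statement) =====
-- stated objective: faster
-- what changed: Replaces the region-cell x fleet x ship-cell triple scan with a single pass over the fleet using closed-form interval-intersection tests against the exclusion rectangle.
import Mathlib
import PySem

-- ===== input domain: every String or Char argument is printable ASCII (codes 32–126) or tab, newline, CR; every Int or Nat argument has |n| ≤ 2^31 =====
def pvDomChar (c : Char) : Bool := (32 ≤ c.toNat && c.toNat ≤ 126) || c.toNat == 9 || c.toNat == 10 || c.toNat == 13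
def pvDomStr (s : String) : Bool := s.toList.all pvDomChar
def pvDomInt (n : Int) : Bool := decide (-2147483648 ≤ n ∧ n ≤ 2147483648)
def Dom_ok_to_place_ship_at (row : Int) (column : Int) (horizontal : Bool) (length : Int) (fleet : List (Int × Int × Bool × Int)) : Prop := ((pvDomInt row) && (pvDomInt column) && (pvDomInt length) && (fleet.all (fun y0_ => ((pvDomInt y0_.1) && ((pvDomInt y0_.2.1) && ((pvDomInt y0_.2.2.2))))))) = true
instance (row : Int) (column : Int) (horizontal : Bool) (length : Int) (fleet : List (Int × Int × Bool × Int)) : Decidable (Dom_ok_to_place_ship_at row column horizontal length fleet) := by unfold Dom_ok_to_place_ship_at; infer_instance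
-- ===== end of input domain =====

-- B replaces A's region-cell × fleet × ship-cell triple scan by a single pass
-- over the fleet with closed-form interval-intersection tests (faster).

-- ===== PORT A =====
-- helper of A: scans every ship cell for a hit at (row, column)
def is_open_sea (row : Int) (column : Int) (fleet : List (Int × Int × Bool × Int)) : Bool :=
  match fleet with
  | [] => true
  | ship :: rest =>
      if (if ship.2.2.1 then
            (PySem.List.pyRange ship.2.1 (ship.2.1 + ship.2.2.2) 1).any
              (fun j => column == j && row == ship.1)
          else
            (PySem.List.pyRange ship.1 (ship.1 + ship.2.2.2) 1).any
              (fun i => row == i && column == ship.2.1))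
      then false
      else is_open_sea row column rest

def ok_to_place_ship_at (row : Int) (column : Int) (horizontal : Bool) (length : Int) (fleet : List (Int × Int × Bool × Int)) : Bool :=
  if horizontal then
    if (PySem.List.pyRange (row - 1) (row + 2) 1).any (fun i =>
         (PySem.List.pyRange (column - 1) (column + length + 1) 1).any (fun j =>
           is_open_sea i j fleet == false)) then false
    else if column + length - 1 > 9 then false
    else true
  else
    if (PySem.List.pyRange (row - 1) (row + length + 1) 1).any (fun i =>
         (PySem.List.pyRange (column - 1) (column + 2) 1).any (fun j =>
           is_open_sea i j fleet == false)) then false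
    else if row + length - 1 > 9 then false
    else true

-- ===== PORT B =====
-- does this ship's span intersect the exclusion rectangle [rlo,rhi] × [clo,chi]?
def pvShipHits (rlo rhi clo chi : Int) (ship : Int × Int × Bool × Int) : Bool :=
  match ship with
  | (r0, c0, h, l) =>
      if h then rlo ≤ r0 && r0 ≤ rhi && max c0 clo ≤ min (c0 + l - 1) chi
      else clo ≤ c0 && c0 ≤ chi && max r0 rlo ≤ min (r0 + l - 1) rhi

-- B's fleet loop with early exit
def pvAltLoop (rlo rhi clo chi : Int) (fleet : List (Int × Int × Bool × Int)) : Bool :=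
  match fleet with
  | [] => true
  | ship :: rest =>
      if pvShipHits rlo rhi clo chi ship then false else pvAltLoop rlo rhi clo chi rest

def ok_to_place_ship_at_alt (row : Int) (column : Int) (horizontal : Bool) (length : Int) (fleet : List (Int × Int × Bool × Int)) : Bool :=
  match (if horizontal then (row - 1, row + 1, column - 1, column + length)
         else (row - 1, row + length, column - 1, column + 1)) with
  | (rlo, rhi, clo, chi) =>
      if pvAltLoop rlo rhi clo chi fleet then
        (if horizontal then decide (column + length - 1 ≤ 9) else decide (row + length - 1 ≤ 9))
      else false

-- ===== PRECONDITION & SPEC =====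
def Spec_ok_to_place_ship_at (row : Int) (column : Int) (horizontal : Bool) (length : Int) (fleet : List (Int × Int × Bool × Int)) (out : Bool) : Prop := out = ok_to_place_ship_at_alt row column horizontal length fleet
instance (row : Int) (column : Int) (horizontal : Bool) (length : Int) (fleet : List (Int × Int × Bool × Int)) (out : Bool) : Decidable (Spec_ok_to_place_ship_at row column horizontal length fleet out) := by unfold Spec_ok_to_place_ship_at; infer_instance

-- ===== CLAIM (what is proved, stated in full; the proofs are below) =====
def Claim_equal_ok_to_place_ship_at : Prop := ∀ (row : Int) (column : Int) (horizontal : Bool) (length : Int) (fleet : List (Int × Int × Bool × Int)), Dom_ok_to_place_ship_at row column horizontal length fleet → Spec_ok_to_place_ship_at row column horizontal length fleet (ok_to_place_ship_at row column horizontal length fleet)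

-- ===== LEMMAS AND PROOFS =====

-- the per-cell hit test that A's is_open_sea performs for one ship
def pvCellHit (i j : Int) (ship : Int × Int × Bool × Int) : Bool :=
  if ship.2.2.1 then
    (PySem.List.pyRange ship.2.1 (ship.2.1 + ship.2.2.2) 1).any
      (fun jj => j == jj && i == ship.1)
  else
    (PySem.List.pyRange ship.1 (ship.1 + ship.2.2.2) 1).any
      (fun ii => i == ii && j == ship.2.1)

theorem is_open_sea_eq (i j : Int) (fleet : List (Int × Int × Bool × Int)) :
    is_open_sea i j fleet = !fleet.any (pvCellHit i j) := by
  induction fleet with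
  | nil => rfl
  | cons s rest ih =>
      simp only [is_open_sea, List.any_cons, pvCellHit]
      by_cases h : (if s.2.2.1 then
            (PySem.List.pyRange s.2.1 (s.2.1 + s.2.2.2) 1).any (fun jj => j == jj && i == s.1)
          else
            (PySem.List.pyRange s.1 (s.1 + s.2.2.2) 1).any (fun ii => i == ii && j == s.2.1)) = true
      · simp [h]
      · simp [h, ih]

theorem altLoop_eq (rlo rhi clo chi : Int) (fleet : List (Int × Int × Bool × Int)) :
    pvAltLoop rlo rhi clo chi fleet = !fleet.any (pvShipHits rlo rhi clo chi) := by
  induction fleet with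
  | nil => rfl
  | cons s rest ih =>
      simp only [pvAltLoop, List.any_cons]
      by_cases h : pvShipHits rlo rhi clo chi s = true
      · simp [h]
      · simp [h, ih]

-- key: one ship intersects the rectangle iff some rectangle cell hits it
theorem ship_region_iff (rlo rhi clo chi : Int) (s : Int × Int × Bool × Int) :
    (∃ i, (rlo ≤ i ∧ i < rhi + 1) ∧ ∃ j, (clo ≤ j ∧ j < chi + 1) ∧ pvCellHit i j s = true)
      ↔ pvShipHits rlo rhi clo chi s = true := by
  obtain ⟨r0, c0, h, l⟩ := s
  cases h
  · simp [pvCellHit, pvShipHits, List.any_eq_true, PySem.List.mem_pyRange_one]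
    constructor
    · rintro ⟨i, hi⟩; omega
    · intro hh; exact ⟨max r0 rlo, by omega⟩
  · simp [pvCellHit, pvShipHits, List.any_eq_true, PySem.List.mem_pyRange_one]
    intro h1 h2
    constructor
    · rintro ⟨x, hx⟩; omega
    · intro hh; exact ⟨max c0 clo, by omega⟩

theorem region_any_eq (rlo rhi clo chi : Int) (fleet : List (Int × Int × Bool × Int)) :
    ((PySem.List.pyRange rlo (rhi + 1) 1).any fun i =>
      (PySem.List.pyRange clo (chi + 1) 1).any fun j =>
        is_open_sea i j fleet == false)
      = fleet.any (pvShipHits rlo rhi clo chi) := by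
  apply Bool.coe_iff_coe.mp
  simp only [List.any_eq_true, PySem.List.mem_pyRange_one, is_open_sea_eq,
    beq_iff_eq, Bool.not_eq_false']
  constructor
  · rintro ⟨i, hi, j, hj, s, hs, hcell⟩
    exact ⟨s, hs, (ship_region_iff rlo rhi clo chi s).mp ⟨i, hi, j, hj, hcell⟩⟩
  · rintro ⟨s, hs, hhit⟩
    obtain ⟨i, hi, j, hj, hcell⟩ := (ship_region_iff rlo rhi clo chi s).mpr hhit
    exact ⟨i, hi, j, hj, s, hs, hcell⟩

-- ===== VERDICT (by name: the statement is the Claim_ definition above) =====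
theorem ok_to_place_ship_at_spec : Claim_equal_ok_to_place_ship_at := by
  intro row column horizontal length fleet _
  unfold Spec_ok_to_place_ship_at ok_to_place_ship_at ok_to_place_ship_at_alt
  cases horizontal
  · simp only [Bool.false_eq_true, altLoop_eq]
    rw [show row + length + 1 = (row + length) + 1 by ring,
        show column + 2 = (column + 1) + 1 by ring, region_any_eq]
    cases hf : fleet.any (pvShipHits (row - 1) (row + length) (column - 1) (column + 1)) <;>
      simp [hf]
    by_cases h9 : (9:Int) < row + length - 1 <;> simp [h9] <;> omega
  · simp only [altLoop_eq]
    rw [show row + 2 = (row + 1) + 1 by ring,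
        show column + length + 1 = (column + length) + 1 by ring, region_any_eq]
    cases hf : fleet.any (pvShipHits (row - 1) (row + 1) (column - 1) (column + length)) <;>
      simp [hf]
    by_cases h9 : (9:Int) < column + length - 1 <;> simp [h9] <;> omega
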